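-- pv_equiv track=rewrite | github.com/bouftonmouth/Projet_deploiement_PACE_ALBERTI | Code_projet.py | calc
-- ===== SOURCE A (Python) =====
-- def calc(gen,r0):
--     """
--     Function that calulate the genome cost in function of r0.
--
--     Args:
--         gen (int): list that represent the genom
--         r0  (int): threshold
--
--     Return:
--         cout (int): contain the genom cost.
--
--     Exemple:
--     		>>> a = [-1, 1, -1, 1, 1]
--     		>>> calc(a, 1)
--     		>>> 3
--     """
--
--     pos=0
--     cout = 0
--     for i in range(len(gen)):
--         pos+=gen[i]
--         if pos <= -r0 or pos >= r0:
--             cout +=1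
--     return cout
-- ===== SOURCE B (Python) =====
-- def calc(gen, r0):
--     # Divide and conquer: each segment, evaluated from a base offset, yields
--     # (number of prefix sums hitting the threshold, sum of the segment); the
--     # right half is processed with the base shifted by the left half's sum.
--     def go(base, xs):
--         if len(xs) == 0:
--             return (0, 0)
--         if len(xs) == 1:
--             s = base + xs[0]
--             return ((1 if s <= -r0 or s >= r0 else 0), xs[0])
--         mid = len(xs) // 2
--         c1, s1 = go(base, xs[:mid])
--         c2, s2 = go(base + s1, xs[mid:])
--         return (c1 + c2, s1 + s2)
--     return go(0, list(gen))[0]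
-- ===== Notes on version B (the rewrite author's own statement) =====
-- stated objective: alternative
-- what changed: Replaces A's left-to-right loop with a running sum and counter by a divide-and-conquer recursion: each half returns (threshold-hit count, segment sum) and the right half is evaluated with the base offset by the left half's sum.
import Mathlib
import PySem

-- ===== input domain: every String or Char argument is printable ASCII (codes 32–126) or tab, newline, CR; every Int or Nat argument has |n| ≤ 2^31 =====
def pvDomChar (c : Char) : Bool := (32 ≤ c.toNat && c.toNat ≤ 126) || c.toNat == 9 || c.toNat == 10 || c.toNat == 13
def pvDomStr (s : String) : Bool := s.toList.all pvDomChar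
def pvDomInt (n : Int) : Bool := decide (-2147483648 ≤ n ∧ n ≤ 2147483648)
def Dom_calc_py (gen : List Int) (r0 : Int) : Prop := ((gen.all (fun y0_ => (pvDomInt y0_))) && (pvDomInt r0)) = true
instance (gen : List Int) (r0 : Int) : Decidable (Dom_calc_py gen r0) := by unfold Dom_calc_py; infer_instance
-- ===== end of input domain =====

-- B replaces A's left-to-right running-sum loop by a divide-and-conquer recursion
-- returning (hit count, segment sum) per half; alternative structure, not faster.


-- ===== PORT A =====
-- pos=0; cout=0; for i in range(len(gen)): pos+=gen[i]; if pos <= -r0 or pos >= r0: cout += 1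
-- (iterating i over range(len(gen)) reading gen[i] = iterating over gen's elements in order)
def calc_py (gen : List Int) (r0 : Int) : Int :=
  (gen.foldl
    (fun (s : Int × Int) x =>
      let pos := s.1 + x
      (pos, if pos ≤ -r0 ∨ pos ≥ r0 then s.2 + 1 else s.2))
    (0, 0)).2

-- ===== PORT B =====
-- go(base, xs) of Source B: divide and conquer returning (hit count, segment sum)
def calcGo (r0 base : Int) (xs : List Int) : Int × Int :=
  match xs with
  | [] => (0, 0)
  | [x] =>
    let s := base + x
    ((if s ≤ -r0 ∨ s ≥ r0 then 1 else 0), x)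
  | x :: y :: rest =>
    let xs' := x :: y :: rest
    let mid := xs'.length / 2
    let p1 := calcGo r0 base (xs'.take mid)
    let p2 := calcGo r0 (base + p1.2) (xs'.drop mid)
    (p1.1 + p2.1, p1.2 + p2.2)
termination_by xs.length
decreasing_by
  · simp; omega
  · simp; omega

def calc_py_alt (gen : List Int) (r0 : Int) : Int :=
  (calcGo r0 0 gen).1

-- ===== PRECONDITION & SPEC =====
def Spec_calc_py (gen : List Int) (r0 : Int) (out : Int) : Prop := out = calc_py_alt gen r0
instance (gen : List Int) (r0 : Int) (out : Int) : Decidable (Spec_calc_py gen r0 out) := by unfold Spec_calc_py; infer_instance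

-- ===== CLAIM (what is proved, stated in full; the proofs are below) =====
def Claim_equal_calc_py : Prop := ∀ (gen : List Int) (r0 : Int), Dom_calc_py gen r0 → Spec_calc_py gen r0 (calc_py gen r0)

-- ===== LEMMAS AND PROOFS =====

-- prefix sums of xs starting from base (the values A's `pos` runs through)
def prefixSums (base : Int) : List Int → List Int
  | [] => []
  | x :: xs => (base + x) :: prefixSums (base + x) xs

theorem prefixSums_append (base : Int) (l r : List Int) :
    prefixSums base (l ++ r) = prefixSums base l ++ prefixSums (base + l.sum) r := by
  induction l generalizing base with
  | nil => simp [prefixSums]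
  | cons x xs ih => simp [prefixSums, ih, add_assoc]

theorem calc_fold_countP (r0 : Int) (gen : List Int) :
    ∀ (pos cout : Int),
      (gen.foldl
        (fun (s : Int × Int) x =>
          let p := s.1 + x
          (p, if p ≤ -r0 ∨ p ≥ r0 then s.2 + 1 else s.2))
        (pos, cout)).2
      = cout + ((prefixSums pos gen).countP (fun s => decide (s ≤ -r0 ∨ s ≥ r0)) : Nat) := by
  induction gen with
  | nil => intro pos cout; simp [prefixSums]
  | cons x xs ih =>
    intro pos cout
    simp only [List.foldl, prefixSums, List.countP_cons]
    rw [ih]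
    by_cases h : pos + x ≤ -r0 ∨ pos + x ≥ r0 <;> simp [h] <;> push_cast <;> ring

theorem calcGo_eq (r0 : Int) :
    ∀ (n : Nat) (xs : List Int), xs.length = n → ∀ (base : Int),
      calcGo r0 base xs
        = ((((prefixSums base xs).countP (fun s => decide (s ≤ -r0 ∨ s ≥ r0)) : Nat) : Int), xs.sum) := by
  intro n
  induction n using Nat.strong_induction_on with
  | _ n ih =>
    intro xs hlen base
    match xs with
    | [] => simp [calcGo, prefixSums]
    | [x] =>
      simp only [calcGo, prefixSums, List.countP_cons, List.countP_nil, List.sum_cons,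
        List.sum_nil]
      by_cases h : base + x ≤ -r0 ∨ base + x ≥ r0 <;> simp [h]
    | x :: y :: rest =>
      rw [calcGo]
      have hmidlt : (x :: y :: rest).length / 2 < (x :: y :: rest).length := by
        simp; omega
      have hmidpos : 1 ≤ (x :: y :: rest).length / 2 := by simp; omega
      set xs' := x :: y :: rest with hxs'
      set mid := xs'.length / 2 with hmid
      have hL : (xs'.take mid).length < n := by
        rw [← hlen]; simp; omega
      have hR : (xs'.drop mid).length < n := by
        rw [← hlen]; simp; omega
      rw [ih _ hL (xs'.take mid) rfl base,
          ih _ hR (xs'.drop mid) rfl (base + (xs'.take mid).sum)]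
      have hsplit : xs' = xs'.take mid ++ xs'.drop mid := (List.take_append_drop mid xs').symm
      conv_rhs => rw [hsplit]
      rw [prefixSums_append, List.countP_append, List.sum_append]
      simp only
      push_cast
      ring_nf

-- ===== VERDICT (by name: the statement is the Claim_ definition above) =====
theorem calc_py_spec : Claim_equal_calc_py := by
  intro gen r0 _
  unfold Spec_calc_py calc_py calc_py_alt
  rw [calc_fold_countP, calcGo_eq r0 gen.length gen rfl 0]
  simp
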